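-- pv_equiv track=rewrite | github.com/corlin/finetune_memsafe | industry_evaluation/evaluators/terminology_usage_evaluator.py | _analyze_term_introduction
-- ===== SOURCE A (Python) =====
-- from typing import Dict, List, Any, Set, Tuple, Optional
-- from collections import defaultdict, Counter
--
-- def _analyze_term_introduction(part_terms: List[List[str]]) -> Dict[str, int]:
--     """分析术语引入模式"""
--     term_first_appearance = {}
--
--     for part_index, terms in enumerate(part_terms):
--         for term in terms:
--             if term not in term_first_appearance:
--                 term_first_appearance[term] = part_index
--
--     introduction_pattern = defaultdict(int)
--     for term, first_part in term_first_appearance.items():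
--         introduction_pattern[first_part] += 1
--
--     return dict(introduction_pattern)
-- ===== SOURCE B (Python) =====
-- from collections import defaultdict
-- from typing import Dict, List
--
-- def _analyze_term_introduction(part_terms: List[List[str]]) -> Dict[str, int]:
--     """Single fused pass: count a term at the part where it is first seen."""
--     seen = set()
--     introduction_pattern = defaultdict(int)
--     for part_index, terms in enumerate(part_terms):
--         for term in terms:
--             if term not in seen:
--                 seen.add(term)
--                 introduction_pattern[part_index] += 1
--     return dict(introduction_pattern)
-- ===== Notes on version B (the rewrite author's own statement) =====
-- stated objective: simpler
-- what changed: B fuses A's two phases (build a term->first-part dict, then aggregate it into counts) into one pass that keeps only a seen-set and the running counter, never materializing the term->part table.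
import Mathlib
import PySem

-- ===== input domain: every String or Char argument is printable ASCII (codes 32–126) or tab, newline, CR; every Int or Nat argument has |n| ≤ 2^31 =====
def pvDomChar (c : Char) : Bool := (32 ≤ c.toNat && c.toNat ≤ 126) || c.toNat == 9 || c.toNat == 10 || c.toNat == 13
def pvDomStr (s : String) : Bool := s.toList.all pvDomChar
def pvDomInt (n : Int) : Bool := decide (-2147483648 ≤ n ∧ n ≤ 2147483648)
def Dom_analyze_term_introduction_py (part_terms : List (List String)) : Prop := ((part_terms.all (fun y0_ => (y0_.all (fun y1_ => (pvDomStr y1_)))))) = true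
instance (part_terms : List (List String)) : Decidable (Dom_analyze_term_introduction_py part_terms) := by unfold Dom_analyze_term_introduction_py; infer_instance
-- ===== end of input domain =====

-- B fuses A's two phases (first-appearance table, then aggregation) into one pass over the
-- parts that keeps only a seen-set and the running per-part counter (objective: simpler).

-- ===== PORT A =====
-- two phases: build term -> first part index, then count terms per first part
def analyze_term_introduction_py (part_terms : List (List String)) : List (Int × Int) :=
  let term_first_appearance :=
    (PySem.List.enumerate part_terms 0).foldl
      (fun d p => p.2.foldl
        (fun d term => if d.contains term = false then d.insert term p.1 else d) d)
      PySem.Dict.empty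
  let introduction_pattern :=
    term_first_appearance.items.foldl
      (fun d p => d.modify p.2 0 (· + 1)) PySem.Dict.empty
  introduction_pattern.items

-- ===== PORT B =====
-- one pass: a seen-set plus the running counter (defaultdict(int))
def analyze_term_introduction_py_alt (part_terms : List (List String)) : List (Int × Int) :=
  let st :=
    (PySem.List.enumerate part_terms 0).foldl
      (fun st p => p.2.foldl
        (fun (st : PySem.Set String × PySem.Dict Int Int) term =>
          if PySem.Set.contains st.1 term = false then
            (PySem.Set.add st.1 term, st.2.modify p.1 0 (· + 1))
          else st) st)
      (PySem.Set.empty, PySem.Dict.empty)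
  st.2.items

-- ===== PRECONDITION & SPEC =====
def Spec_analyze_term_introduction_py (part_terms : List (List String)) (out : List (Int × Int)) : Prop := out = analyze_term_introduction_py_alt part_terms
instance (part_terms : List (List String)) (out : List (Int × Int)) : Decidable (Spec_analyze_term_introduction_py part_terms out) := by unfold Spec_analyze_term_introduction_py; infer_instance

-- ===== CLAIM (what is proved, stated in full; the proofs are below) =====
def Claim_equal_analyze_term_introduction_py : Prop := ∀ (part_terms : List (List String)), Dom_analyze_term_introduction_py part_terms → Spec_analyze_term_introduction_py part_terms (analyze_term_introduction_py part_terms)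

-- ===== LEMMAS AND PROOFS =====

-- B's running state equals (keys of A's first-appearance table, counter of its value column).
theorem nodup_inner (terms : List String) (i : Int) (d : PySem.Dict String Int)
    (hnd : d.keys.Nodup) :
    (terms.foldl
      (fun d term => if d.contains term = false then d.insert term i else d) d).keys.Nodup := by
  induction terms generalizing d with
  | nil => exact hnd
  | cons t ts ih =>
    simp only [List.foldl_cons]
    by_cases hc : d.contains t = false
    · simp only [hc, if_true]
      exact ih _ (PySem.Dict.nodup_keys_insert d t i hnd)
    · rw [if_neg hc]
      exact ih _ hnd

theorem inner_invariant (terms : List String) (i : Int) (d : PySem.Dict String Int)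
    (hnd : d.keys.Nodup) :
    terms.foldl
      (fun (st : PySem.Set String × PySem.Dict Int Int) term =>
        if PySem.Set.contains st.1 term = false then
          (PySem.Set.add st.1 term, st.2.modify i 0 (· + 1))
        else st)
      (d.keys, PySem.Dict.counter (d.items.map (·.2)))
    = (let d' := terms.foldl
        (fun d term => if d.contains term = false then d.insert term i else d) d;
       (d'.keys, PySem.Dict.counter (d'.items.map (·.2)))) := by
  induction terms generalizing d with
  | nil => rfl
  | cons t ts ih =>
    simp only [List.foldl_cons]
    have hcc : PySem.Set.contains d.keys t = d.contains t := by
      simp [PySem.Set.contains, PySem.Dict.contains_eq_decide_mem_keys]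
    by_cases hc : d.contains t = false
    · rw [hcc, hc]
      simp only [if_true]
      have hkeys : (d.insert t i).keys = d.keys ++ [t] :=
        PySem.Dict.keys_insert_of_not_contains d i hc
      have hitems : (d.insert t i).items = d.items ++ [(t, i)] :=
        PySem.Dict.items_insert_of_not_contains d i hc
      have hadd : PySem.Set.add d.keys t = d.keys ++ [t] := by
        rw [PySem.Set.add, hcc, hc]
        simp
      have hcnt : (PySem.Dict.counter (d.items.map (·.2))).modify i 0 (· + 1)
          = PySem.Dict.counter ((d.insert t i).items.map (·.2)) := by
        rw [hitems]
        simp [PySem.Dict.counter_append_singleton]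
      rw [hadd, ← hkeys, hcnt]
      exact ih _ (PySem.Dict.nodup_keys_insert d t i hnd)
    · have hc' : d.contains t = true := by simpa using hc
      rw [hcc, hc']
      simp only [Bool.true_eq_false, if_false]
      exact ih _ hnd

theorem outer_invariant (parts : List (List String)) (s : Int) (d : PySem.Dict String Int)
    (hnd : d.keys.Nodup) :
    (PySem.List.enumerate parts s).foldl
      (fun st p => p.2.foldl
        (fun (st : PySem.Set String × PySem.Dict Int Int) term =>
          if PySem.Set.contains st.1 term = false then
            (PySem.Set.add st.1 term, st.2.modify p.1 0 (· + 1))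
          else st) st)
      (d.keys, PySem.Dict.counter (d.items.map (·.2)))
    = (let d' := (PySem.List.enumerate parts s).foldl
        (fun d p => p.2.foldl
          (fun d term => if d.contains term = false then d.insert term p.1 else d) d) d;
       (d'.keys, PySem.Dict.counter (d'.items.map (·.2)))) := by
  induction parts generalizing s d with
  | nil => rfl
  | cons ts rest ih =>
    rw [PySem.List.enumerate_cons]
    simp only [List.foldl_cons]
    rw [inner_invariant ts s d hnd]
    exact ih (s + 1) _ (nodup_inner ts s d hnd)

-- ===== VERDICT (by name: the statement is the Claim_ definition above) =====
theorem analyze_term_introduction_py_spec : Claim_equal_analyze_term_introduction_py := by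
  intro part_terms _
  unfold Spec_analyze_term_introduction_py
  unfold analyze_term_introduction_py analyze_term_introduction_py_alt
  have h := outer_invariant part_terms 0 PySem.Dict.empty (by simp)
  simp only [] at h ⊢
  rw [show ((PySem.Set.empty : PySem.Set String), (PySem.Dict.empty : PySem.Dict Int Int))
      = ((PySem.Dict.empty : PySem.Dict String Int).keys,
         PySem.Dict.counter (((PySem.Dict.empty : PySem.Dict String Int)).items.map (·.2)))
    from rfl, h]
  simp only [PySem.Dict.counter, List.foldl_map]
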